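-- pv_equiv track=rewrite | github.com/tugotpwnd/PyRevMate | models/increment_revision_model.py | is_all_revisions_filled
-- ===== SOURCE A (Python) =====
-- def is_all_revisions_filled(table_data):
--     """
--     Check if all revisions in the table data have at least one field filled.
--
--     Parameters:
--     - table_data: A list of dictionaries containing table data.
--
--     Returns:
--     - True if all revisions (up to the highest revision index found in the table)
--       have at least one field filled; False otherwise.
--     """
--
--     revision_fields = get_revision_fields()
--     max_revisions = find_max_revisions(table_data)
--     for i in range(1, max_revisions + 1):
--
--         # Check if any field for this revision index has data
--         if not any(
--             field.get("Assignment") == template.format(i=i) and field.get("Value")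
--             for field in table_data
--             for template in revision_fields
--         ):
--             return False  # At least one revision is missing data
--
--     return True  # All revisions are filled
--
-- def find_max_revisions(table_data):
--     # Determine the highest revision index (i) present in the table data
--     max_revisions = 0
--     for field in table_data:
--         assignment = field.get("Assignment", "")
--         if assignment.startswith("REV ") and "REV" in assignment:
--             try:
--                 index = int(assignment.split(" ")[1])
--                 max_revisions = max(max_revisions, index)
--             except ValueError:
--                 continue
--     return max_revisions
--
-- def get_revision_fields():
--     """
--     Returns the list of revision field templates.
--     """
--     return [
--         "REV {i} REV", "REV {i} DATE", "REV {i} DESC", "REV {i} DESIGNER",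
--         "REV {i} DRAFTED", "REV {i} CHECKED", "REV {i} RPEQ",
--         "REV {i} RPEQSIGN", "REV {i} COMPANY"
--     ]
-- ===== SOURCE B (Python) =====
-- def is_all_revisions_filled(table_data):
--     suffixes = ("REV", "DATE", "DESC", "DESIGNER", "DRAFTED", "CHECKED",
--                 "RPEQ", "RPEQSIGN", "COMPANY")
--     max_rev = 0
--     filled = set()
--     for field in table_data:
--         assignment = field.get("Assignment", "")
--         if assignment.startswith("REV "):
--             try:
--                 max_rev = max(max_rev, int(assignment.split(" ")[1]))
--             except ValueError:
--                 pass
--             if field.get("Value"):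
--                 rest = assignment[4:]
--                 for suf in suffixes:
--                     tail = " " + suf
--                     if rest.endswith(tail):
--                         filled.add(rest[:len(rest) - len(tail)])
--     return all(str(i) in filled for i in range(1, max_rev + 1))
-- ===== Notes on version B (the rewrite author's own statement) =====
-- stated objective: alternative
-- what changed: Instead of rescanning the whole table against all 9 formatted templates once per revision index i in 1..max, B makes a single pass over the table collecting the set of satisfied revision-index strings (recognised via startswith/endswith/slice instead of per-i template formatting), then checks membership of str(i) for each i.
import Mathlib
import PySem

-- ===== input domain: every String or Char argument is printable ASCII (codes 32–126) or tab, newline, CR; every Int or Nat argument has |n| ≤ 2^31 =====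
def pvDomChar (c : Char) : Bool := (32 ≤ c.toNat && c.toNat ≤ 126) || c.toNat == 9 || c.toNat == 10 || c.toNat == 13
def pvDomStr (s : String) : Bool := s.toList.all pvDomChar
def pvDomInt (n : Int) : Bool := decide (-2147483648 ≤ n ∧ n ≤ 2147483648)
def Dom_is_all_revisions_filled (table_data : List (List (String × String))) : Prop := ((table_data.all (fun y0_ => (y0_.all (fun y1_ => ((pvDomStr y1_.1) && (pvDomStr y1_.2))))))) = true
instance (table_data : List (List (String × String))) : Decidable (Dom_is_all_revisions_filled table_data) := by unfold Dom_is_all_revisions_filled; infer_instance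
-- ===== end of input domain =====

-- B replaces A's per-revision-index rescans of the whole table (one `any` over
-- table×templates for every i in 1..max) by ONE pass over the table that collects the
-- set of satisfied revision-index strings, followed by a single membership sweep.

-- `field.get("Value")` used as a truth value (shared by both Pythons verbatim)
def pv_truthy (field : List (String × String)) : Bool :=
  match (PySem.Dict.mk field).get? "Value" with
  | some v => !(v.toList == [])
  | none => false

-- The 9 templates are the literal strings "REV {i} <SUF>" for these suffixes;
-- `template.format(i=i)` is ported by hand as "REV " ++ str(i) ++ " " ++ SUF,
-- which is exact for these literal templates and an int argument i.
def pv_revision_suffixes : List String :=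
  ["REV", "DATE", "DESC", "DESIGNER", "DRAFTED", "CHECKED", "RPEQ", "RPEQSIGN", "COMPANY"]

-- ===== PORT A =====
def pv_template (i : Int) (suf : String) : List Char :=
  "REV ".toList ++ PySem.Int.toChars i ++ ' ' :: suf.toList

def pv_find_max_step (acc : Int) (field : List (String × String)) : Int :=
  let assignment := (PySem.Dict.mk field).getD "Assignment" ""
  if PySem.Str.startswith assignment "REV " && PySem.Str.isIn "REV" assignment then
    match PySem.List.pyGet? (PySem.Chars.splitOn assignment.toList " ".toList) 1 with
    | some piece =>
      (match PySem.Int.ofChars? piece with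
       | some index => max acc index      -- max_revisions = max(max_revisions, index)
       | none => acc)                     -- except ValueError: continue
    | none => acc                         -- IndexError cannot occur: assignment starts with "REV "
  else acc

def pv_find_max_revisions (table_data : List (List (String × String))) : Int :=
  table_data.foldl pv_find_max_step 0

def is_all_revisions_filled (table_data : List (List (String × String))) : Bool :=
  let max_revisions := pv_find_max_revisions table_data
  (PySem.List.pyRange 1 (max_revisions + 1) 1).all (fun i =>
    table_data.any (fun field =>
      pv_revision_suffixes.any (fun suf =>
        (match (PySem.Dict.mk field).get? "Assignment" with
         | some a => a.toList == pv_template i suf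
         | none => false) && pv_truthy field)))

-- ===== PORT B =====
-- one fold step: update the running max exactly as A's helper does, and add the
-- revision-index substring of a matching, filled field to the set
def pvStepB (acc : Int × PySem.Set (List Char)) (field : List (String × String)) :
    Int × PySem.Set (List Char) :=
  let assignment := (PySem.Dict.mk field).getD "Assignment" ""
  if PySem.Str.startswith assignment "REV " then
    let m : Int :=
      match PySem.List.pyGet? (PySem.Chars.splitOn assignment.toList " ".toList) 1 with
      | some piece =>
        (match PySem.Int.ofChars? piece with
         | some idx => max acc.1 idx
         | none => acc.1)
      | none => acc.1
    let filled : PySem.Set (List Char) :=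
      if pv_truthy field then
        let rest := PySem.List.slice assignment.toList (some 4) none    -- assignment[4:]
        pv_revision_suffixes.foldl (fun s suf =>
          let tail := ' ' :: suf.toList                                 -- " " + suf
          if PySem.Chars.endswith rest tail then
            -- rest[:len(rest) - len(tail)]
            PySem.Set.add s (PySem.List.slice rest none (some ((rest.length : Int) - (tail.length : Int))))
          else s) acc.2
      else acc.2
    (m, filled)
  else acc

def is_all_revisions_filled_alt (table_data : List (List (String × String))) : Bool :=
  let r := table_data.foldl pvStepB (0, PySem.Set.empty)
  (PySem.List.pyRange 1 (r.1 + 1) 1).all (fun i =>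
    PySem.Set.contains r.2 (PySem.Int.toChars i))       -- str(i) in filled

-- ===== PRECONDITION & SPEC =====
def Spec_is_all_revisions_filled (table_data : List (List (String × String))) (out : Bool) : Prop := out = is_all_revisions_filled_alt table_data
instance (table_data : List (List (String × String))) (out : Bool) : Decidable (Spec_is_all_revisions_filled table_data out) := by unfold Spec_is_all_revisions_filled; infer_instance

-- ===== CLAIM (what is proved, stated in full; the proofs are below) =====
def Claim_equal_is_all_revisions_filled : Prop := ∀ (table_data : List (List (String × String))), Dom_is_all_revisions_filled table_data → Spec_is_all_revisions_filled table_data (is_all_revisions_filled table_data)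

-- ===== LEMMAS AND PROOFS =====

-- what a single field contributes to B's set
def pvAdds (field : List (String × String)) (x : List Char) : Prop :=
  let assignment := (PySem.Dict.mk field).getD "Assignment" ""
  PySem.Str.startswith assignment "REV " = true ∧ pv_truthy field = true ∧
    ∃ suf ∈ pv_revision_suffixes,
      PySem.Chars.endswith (PySem.List.slice assignment.toList (some 4) none) (' ' :: suf.toList) = true ∧
      x = PySem.List.slice (PySem.List.slice assignment.toList (some 4) none) none
            (some (((PySem.List.slice assignment.toList (some 4) none).length : Int) - ((' ' :: suf.toList).length : Int)))


theorem pv_startswith_isIn (a : String) (h : PySem.Str.startswith a "REV " = true) :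
    PySem.Str.isIn "REV" a = true := by
  rw [PySem.Str.isIn_iff_infix]
  rw [PySem.Str.startswith_eq, PySem.Chars.startswith_iff] at h
  exact (List.IsPrefix.trans (by decide : "REV".toList <+: "REV ".toList) h).isInfix

-- the step of B's fold updates the max exactly as A's find_max step does
theorem pv_step_fst (m : Int) (s : PySem.Set (List Char)) (f : List (String × String)) :
    (pvStepB (m, s) f).1 = pv_find_max_step m f := by
  by_cases h : PySem.Str.startswith ((PySem.Dict.mk f).getD "Assignment" "") "REV " = true
  · have h2 := pv_startswith_isIn _ h
    simp only [PySem.Str.startswith_eq, PySem.Str.isIn_eq] at h h2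
    rw [show "REV ".toList = ['R','E','V',' '] from rfl] at h
    rw [show "REV".toList = ['R','E','V'] from rfl] at h2
    simp [pvStepB, pv_find_max_step, h, h2]
  · simp only [Bool.not_eq_true, PySem.Str.startswith_eq] at h
    rw [show "REV ".toList = ['R','E','V',' '] from rfl] at h
    simp [pvStepB, pv_find_max_step, h]

theorem pv_fold_fst (l : List (List (String × String))) (m : Int) (s : PySem.Set (List Char)) :
    (l.foldl pvStepB (m, s)).1 = l.foldl pv_find_max_step m := by
  induction l generalizing m s with
  | nil => rfl
  | cons f t ih =>
    simp only [List.foldl_cons]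
    rw [show pvStepB (m, s) f = ((pvStepB (m, s) f).1, (pvStepB (m, s) f).2) from rfl,
      ih, pv_step_fst]

-- membership in B's inner per-suffix fold
theorem pv_inner_mem (sufs : List String) (rest : List Char) (s : PySem.Set (List Char)) (x : List Char) :
    x ∈ sufs.foldl (fun s suf =>
        if PySem.Chars.endswith rest (' ' :: suf.toList) then
          PySem.Set.add s (PySem.List.slice rest none (some ((rest.length : Int) - (((' ' :: suf.toList).length : Nat) : Int))))
        else s) s ↔
      x ∈ s ∨ ∃ suf ∈ sufs, PySem.Chars.endswith rest (' ' :: suf.toList) = true ∧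
        x = PySem.List.slice rest none (some ((rest.length : Int) - (((' ' :: suf.toList).length : Nat) : Int))) := by
  induction sufs generalizing s with
  | nil => simp
  | cons a t ih =>
    simp only [List.foldl_cons, ih]
    by_cases h : PySem.Chars.endswith rest (' ' :: a.toList) = true
    · simp [h, PySem.Set.mem_add]
      tauto
    · simp only [Bool.not_eq_true] at h
      simp [h]

-- membership in B's set after the whole fold
theorem pv_fold_mem (l : List (List (String × String))) (m : Int) (s : PySem.Set (List Char)) (x : List Char) :
    x ∈ (l.foldl pvStepB (m, s)).2 ↔ x ∈ s ∨ ∃ f ∈ l, pvAdds f x := by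
  induction l generalizing m s with
  | nil => simp
  | cons f t ih =>
    simp only [List.foldl_cons]
    rw [show pvStepB (m, s) f = ((pvStepB (m, s) f).1, (pvStepB (m, s) f).2) from rfl, ih]
    have hstep : x ∈ (pvStepB (m, s) f).2 ↔ x ∈ s ∨ pvAdds f x := by
      by_cases h : PySem.Str.startswith ((PySem.Dict.mk f).getD "Assignment" "") "REV " = true
      · have hc := h
        rw [PySem.Str.startswith_eq, show "REV ".toList = ['R','E','V',' '] from rfl] at hc
        by_cases hv : pv_truthy f = true
        · simp only [pvStepB, pvAdds]
          simp only [PySem.Str.startswith_eq, show "REV ".toList = ['R','E','V',' '] from rfl]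
          simp only [hc, hv, if_true]
          rw [pv_inner_mem]
          simp
        · simp only [Bool.not_eq_true] at hv
          simp [pvStepB, pvAdds, hc, hv]
      · simp only [Bool.not_eq_true] at h
        have hc := h
        rw [PySem.Str.startswith_eq, show "REV ".toList = ['R','E','V',' '] from rfl] at hc
        simp [pvStepB, pvAdds, hc]
    rw [hstep]
    simp only [List.mem_cons]
    constructor
    · rintro ((hx | ha) | ⟨g, hg, hga⟩)
      · exact Or.inl hx
      · exact Or.inr ⟨f, Or.inl rfl, ha⟩
      · exact Or.inr ⟨g, Or.inr hg, hga⟩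
    · rintro (hx | ⟨g, (rfl | hg), hga⟩)
      · exact Or.inl (Or.inl hx)
      · exact Or.inl (Or.inr hga)
      · exact Or.inr ⟨g, hg, hga⟩

-- "a == 'REV ' + mid + tail" as startswith/endswith/take on lists
theorem pv_tmpl_iff (L mid tail : List Char) :
    L = ['R','E','V',' '] ++ (mid ++ tail) ↔
      (PySem.Chars.startswith L ['R','E','V',' '] = true ∧
       PySem.Chars.endswith (L.drop 4) tail = true ∧
       mid = List.take ((L.drop 4).length - tail.length) (L.drop 4)) := by
  constructor
  · rintro rfl
    have hd : (['R','E','V',' '] ++ (mid ++ tail)).drop 4 = mid ++ tail := rfl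
    refine ⟨(PySem.Chars.startswith_iff _ _).mpr ⟨mid ++ tail, rfl⟩, ?_, ?_⟩
    · rw [hd]; exact (PySem.Chars.endswith_iff _ _).mpr ⟨mid, rfl⟩
    · rw [hd]
      simp
  · rintro ⟨h1, h2, h3⟩
    obtain ⟨u, hu⟩ := (PySem.Chars.startswith_iff _ _).mp h1
    have hdrop : L.drop 4 = u := by rw [← hu]; rfl
    obtain ⟨v, hv⟩ := (PySem.Chars.endswith_iff _ _).mp h2
    rw [hdrop] at h2 h3 hv
    have hmid : mid = v := by
      rw [h3, ← hv]
      simp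
    rw [← hu, ← hv, hmid]

theorem pv_slice_from4 (L : List Char) : PySem.List.slice L (some 4) none = L.drop 4 := by
  rw [PySem.List.slice_from L (by norm_num : (0:Int) ≤ 4)]
  rfl

theorem pv_slice_take (rest tail : List Char) (h : tail.length ≤ rest.length) :
    PySem.List.slice rest none (some ((rest.length : Int) - ((tail.length : Nat) : Int))) =
      List.take (rest.length - tail.length) rest := by
  rw [PySem.List.slice_to rest (by omega : (0:Int) ≤ (rest.length : Int) - ((tail.length : Nat) : Int))]
  congr 1
  omega

-- per-field bridge: A's template comparison at index i holds iff the field adds str(i)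
theorem pv_field_bridge (field : List (String × String)) (i : Int) :
    (pv_revision_suffixes.any (fun suf =>
      (match (PySem.Dict.mk field).get? "Assignment" with
       | some a => a.toList == pv_template i suf
       | none => false) && pv_truthy field)) = true ↔ pvAdds field (PySem.Int.toChars i) := by
  rw [List.any_eq_true]
  simp only [Bool.and_eq_true]
  rcases hga : (PySem.Dict.mk field).get? "Assignment" with _ | a
  · simp only [hga, pvAdds, PySem.Dict.getD_eq_get?_getD]
    constructor
    · rintro ⟨suf, hs, hfalse, -⟩
      exact absurd hfalse (by simp)
    · rintro ⟨hsw, -⟩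
      exact absurd hsw (by decide)
  · have hgd : (PySem.Dict.mk field).getD "Assignment" "" = a := by
      rw [PySem.Dict.getD_eq_get?_getD, hga]
      rfl
    simp only [pvAdds, hgd, beq_iff_eq]
    constructor
    · rintro ⟨suf, hs, heq, htr⟩
      rw [pv_template, show "REV ".toList = ['R','E','V',' '] from rfl] at heq
      obtain ⟨h1, h2, h3⟩ := (pv_tmpl_iff a.toList (PySem.Int.toChars i) (' ' :: suf.toList)).mp heq
      have hlen : (' ' :: suf.toList).length ≤ (a.toList.drop 4).length :=
        List.IsSuffix.length_le ((PySem.Chars.endswith_iff _ _).mp h2)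
      refine ⟨?_, htr, suf, hs, ?_, ?_⟩
      · rw [PySem.Str.startswith_eq, show "REV ".toList = ['R','E','V',' '] from rfl]
        exact h1
      · rw [pv_slice_from4]
        exact h2
      · rw [pv_slice_from4, pv_slice_take _ _ hlen]
        exact h3
    · rintro ⟨hsw, htr, suf, hs, h2, h3⟩
      rw [pv_slice_from4] at h2 h3
      have hlen : (' ' :: suf.toList).length ≤ (a.toList.drop 4).length :=
        List.IsSuffix.length_le ((PySem.Chars.endswith_iff _ _).mp h2)
      rw [pv_slice_take _ _ hlen] at h3
      rw [PySem.Str.startswith_eq, show "REV ".toList = ['R','E','V',' '] from rfl] at hsw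
      refine ⟨suf, hs, ?_, htr⟩
      rw [pv_template, show "REV ".toList = ['R','E','V',' '] from rfl]
      exact (pv_tmpl_iff a.toList (PySem.Int.toChars i) (' ' :: suf.toList)).mpr ⟨hsw, h2, h3⟩

-- ===== VERDICT (by name: the statement is the Claim_ definition above) =====
theorem is_all_revisions_filled_spec : Claim_equal_is_all_revisions_filled := by
  intro table_data _
  unfold Spec_is_all_revisions_filled is_all_revisions_filled is_all_revisions_filled_alt
  rw [show (table_data.foldl pvStepB (0, PySem.Set.empty)) =
      ((table_data.foldl pvStepB (0, PySem.Set.empty)).1,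
       (table_data.foldl pvStepB (0, PySem.Set.empty)).2) from rfl]
  rw [pv_fold_fst]
  show (PySem.List.pyRange 1 (table_data.foldl pv_find_max_step 0 + 1) 1).all _ =
    (PySem.List.pyRange 1 (table_data.foldl pv_find_max_step 0 + 1) 1).all _
  congr 1
  funext i
  apply Bool.coe_iff_coe.mp
  rw [List.any_eq_true, PySem.Set.contains_iff, pv_fold_mem]
  constructor
  · rintro ⟨f, hf, hany⟩
    exact Or.inr ⟨f, hf, (pv_field_bridge f i).mp hany⟩
  · rintro (h0 | ⟨f, hf, hadds⟩)
    · exact absurd h0 (by simp [PySem.Set.empty])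
    · exact ⟨f, hf, (pv_field_bridge f i).mpr hadds⟩
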